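-- pv_equiv track=rewrite | github.com/runeharlyk/vla-robotics | smolvla_visual_pilot/run_evaluation.py | parse_csv_tokens
-- ===== SOURCE A (Python) =====
-- def parse_csv_tokens(raw_values: list[str]) -> list[str]:
--     tokens = []
--     for value in raw_values:
--         for token in value.split(","):
--             token = token.strip()
--             if token:
--                 tokens.append(token)
--     return tokens
-- ===== SOURCE B (Python) =====
-- def parse_csv_tokens(raw_values: list[str]) -> list[str]:
--     # Single character-level scan: a small state machine with a current-token
--     # buffer (cur) and a pending-internal-whitespace buffer (pend): no calls
--     # to split() or strip() at all.
--     tokens = []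
--     for value in raw_values:
--         cur = []   # chars of the current token, never with leading/trailing whitespace
--         pend = []  # whitespace seen after token chars (kept only if more chars follow)
--         for ch in value:
--             if ch == ',':
--                 if cur:
--                     tokens.append(''.join(cur))
--                 cur = []
--                 pend = []
--             elif ch.isspace():
--                 if cur:
--                     pend.append(ch)
--             else:
--                 cur += pend
--                 pend = []
--                 cur.append(ch)
--         if cur:
--             tokens.append(''.join(cur))
--     return tokens
-- ===== Notes on version B (the rewrite author's own statement) =====
-- stated objective: alternative
-- what changed: Replaces the split-then-strip pipeline with a single character-level state machine that scans each string once, maintaining a current-token buffer and a pending-whitespace buffer, emitting tokens at commas and end of string; it never calls split() or strip().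
import Mathlib
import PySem

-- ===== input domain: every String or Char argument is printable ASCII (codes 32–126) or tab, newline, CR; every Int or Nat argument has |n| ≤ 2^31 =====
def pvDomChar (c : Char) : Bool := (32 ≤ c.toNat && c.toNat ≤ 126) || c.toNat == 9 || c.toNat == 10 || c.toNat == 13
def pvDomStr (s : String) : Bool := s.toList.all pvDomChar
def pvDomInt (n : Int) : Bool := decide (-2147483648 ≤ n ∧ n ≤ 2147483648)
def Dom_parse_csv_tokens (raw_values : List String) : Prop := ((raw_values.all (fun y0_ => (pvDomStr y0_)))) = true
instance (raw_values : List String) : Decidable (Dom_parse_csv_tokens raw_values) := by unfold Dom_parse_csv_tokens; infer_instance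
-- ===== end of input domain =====

-- B replaces split/strip with a single character-level state machine (current-token buffer + pending-whitespace buffer); alternative algorithm, same cost.


-- ===== PORT A =====
-- A: for each value, split on ",", strip each token, append the non-empty ones.
-- Strings are handled on the List Char side (PySem.Chars is the exact Python semantics).
def parse_csv_tokens (raw_values : List String) : List String :=
  raw_values.foldl (fun tokens value =>
    (PySem.Chars.splitOn value.toList [',']).foldl (fun tokens tk =>
      let token := PySem.Chars.strip tk
      if token ≠ [] then tokens ++ [String.ofList token] else tokens) tokens) []

-- ===== PORT B =====
-- B: one char-level scan per string; cur = current token chars, pend = whitespace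
-- pending after token chars; a comma (or end of string) flushes a non-empty cur.
def pvStep (s : List String × List Char × List Char) (ch : Char) :
    List String × List Char × List Char :=
  let (tokens, cur, pend) := s
  if ch = ',' then
    ((if cur ≠ [] then tokens ++ [String.ofList cur] else tokens), [], [])
  else if PySem.Chars.isspace ch then
    (tokens, cur, if cur ≠ [] then pend ++ [ch] else pend)
  else
    (tokens, cur ++ pend ++ [ch], [])

def pvFlush (s : List String × List Char × List Char) : List String :=
  if s.2.1 ≠ [] then s.1 ++ [String.ofList s.2.1] else s.1

def parse_csv_tokens_alt (raw_values : List String) : List String :=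
  raw_values.foldl (fun tokens value =>
    pvFlush (value.toList.foldl pvStep (tokens, [], []))) []

-- ===== PRECONDITION & SPEC =====
def Spec_parse_csv_tokens (raw_values : List String) (out : List String) : Prop := out = parse_csv_tokens_alt raw_values
instance (raw_values : List String) (out : List String) : Decidable (Spec_parse_csv_tokens raw_values out) := by unfold Spec_parse_csv_tokens; infer_instance

-- ===== CLAIM (what is proved, stated in full; the proofs are below) =====
def Claim_equal_parse_csv_tokens : Prop := ∀ (raw_values : List String), Dom_parse_csv_tokens raw_values → Spec_parse_csv_tokens raw_values (parse_csv_tokens raw_values)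

-- ===== LEMMAS AND PROOFS =====

-- A simple recursive comma splitter used only inside the proofs.
def spC : List Char → List (List Char)
  | [] => [[]]
  | c :: rest =>
      if c = ',' then [] :: spC rest
      else match spC rest with
        | [] => [[c]]
        | p :: ps => (c :: p) :: ps

lemma spC_ne_nil (l : List Char) : spC l ≠ [] := by
  cases l with
  | nil => simp [spC]
  | cons c rest =>
      simp only [spC]
      split_ifs
      · simp
      · cases h : spC rest <;> simp

def attachPre (pre : List Char) : List (List Char) → List (List Char)
  | [] => [pre]
  | p :: ps => (pre ++ p) :: ps

lemma splitOn_go_spec : ∀ (fuel : Nat) (l cur : List Char) (acc : List (List Char)),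
    l.length < fuel →
    PySem.Chars.splitOn.go [','] fuel l cur acc = acc.reverse ++ attachPre cur.reverse (spC l) := by
  intro fuel
  induction fuel with
  | zero => intro l cur acc h; omega
  | succ f ih =>
      intro l cur acc h
      cases l with
      | nil =>
          simp [PySem.Chars.splitOn.go, spC, attachPre]
      | cons c rest =>
          by_cases hc : c = ','
          · subst hc
            have hpre : [','].isPrefixOf (',' :: rest) = true := by simp [List.isPrefixOf]
            rw [PySem.Chars.splitOn.go]
            simp only [hpre, if_pos]
            rw [ih _ _ _ (by simpa using Nat.lt_of_succ_lt_succ h)]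
            cases hs : spC rest with
            | nil => exact absurd hs (spC_ne_nil rest)
            | cons p ps =>
                simp [spC, hs, attachPre]
          · have hpre : [','].isPrefixOf (c :: rest) = false := by
              simp [List.isPrefixOf, Ne.symm hc]
            rw [PySem.Chars.splitOn.go]
            simp only [hpre, Bool.false_eq_true, if_false]
            rw [ih _ _ _ (by simpa using Nat.lt_of_succ_lt_succ h)]
            cases hs : spC rest with
            | nil => exact absurd hs (spC_ne_nil rest)
            | cons p ps =>
                simp [spC, hs, hc, attachPre]

lemma splitOn_eq_spC (l : List Char) : PySem.Chars.splitOn l [','] = spC l := by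
  unfold PySem.Chars.splitOn
  rw [splitOn_go_spec (l.length + 1) l [] [] (by omega)]
  cases hs : spC l with
  | nil => exact absurd hs (spC_ne_nil l)
  | cons p ps => simp [attachPre]

-- process one list of raw comma-pieces the way A does
def proc (L : List (List Char)) : List String :=
  ((L.map PySem.Chars.strip).filter (fun t => t ≠ [])).map String.ofList

lemma proc_append (L M : List (List Char)) : proc (L ++ M) = proc L ++ proc M := by
  simp [proc]

lemma inner_foldl (L : List (List Char)) : ∀ (tokens : List String),
    L.foldl (fun tokens tk =>
      let token := PySem.Chars.strip tk
      if token ≠ [] then tokens ++ [String.ofList token] else tokens) tokens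
    = tokens ++ proc L := by
  induction L with
  | nil => intro tokens; simp [proc]
  | cons p ps ih =>
      intro tokens
      simp only [List.foldl_cons]
      by_cases hp : PySem.Chars.strip p ≠ []
      · rw [if_pos hp, ih]; simp [proc, hp]
      · rw [if_neg hp, ih]
        simp only [ne_eq, not_not] at hp
        simp [proc, hp]

lemma A_eq_flatMap (raw_values : List String) : ∀ (tokens : List String),
    raw_values.foldl (fun tokens value =>
      (PySem.Chars.splitOn value.toList [',']).foldl (fun tokens tk =>
        let token := PySem.Chars.strip tk
        if token ≠ [] then tokens ++ [String.ofList token] else tokens) tokens) tokens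
    = tokens ++ proc (raw_values.flatMap (fun v => spC v.toList)) := by
  induction raw_values with
  | nil => intro tokens; simp [proc]
  | cons v vs ih =>
      intro tokens
      rw [List.foldl_cons, splitOn_eq_spC, inner_foldl, ih, List.flatMap_cons, proc_append]
      simp

-- ---------- B-side lemmas: the state machine computes proc ∘ spC per string ----------

-- invariant of the scanner state: pend is all whitespace, cur begins and ends
-- with a non-whitespace char, and pend is empty while cur is.
def scanInv (cur pend : List Char) : Prop :=
  (cur = [] ∧ pend = []) ∨
  (cur ≠ [] ∧ (∀ c ∈ pend, PySem.Chars.isspace c = true) ∧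
   (∀ c, cur.head? = some c → PySem.Chars.isspace c = false) ∧
   (∀ c, cur.getLast? = some c → PySem.Chars.isspace c = false))

lemma dropWhile_append_all {p : Char → Bool} (a b : List Char)
    (ha : ∀ c ∈ a, p c = true) : List.dropWhile p (a ++ b) = List.dropWhile p b := by
  induction a with
  | nil => simp
  | cons x xs ih =>
      simp only [List.cons_append, List.dropWhile_cons, ha x (by simp)]
      exact ih (fun c hc => ha c (by simp [hc]))

lemma dropWhile_head_neg {p : Char → Bool} (l : List Char)
    (h : ∀ c, l.head? = some c → p c = false) : List.dropWhile p l = l := by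
  cases l with
  | nil => simp
  | cons x xs => simp [h x rfl]

lemma strip_inv (cur pend : List Char) (h : scanInv cur pend) (hc : cur ≠ []) :
    PySem.Chars.strip (cur ++ pend) = cur := by
  rcases h with ⟨h1, _⟩ | ⟨_, hpend, hhead, hlast⟩
  · exact absurd h1 hc
  · unfold PySem.Chars.strip PySem.Chars.lstrip PySem.Chars.rstrip
    rw [dropWhile_head_neg (cur ++ pend) (by
      intro c hcc
      apply hhead
      cases cur with
      | nil => exact absurd rfl hc
      | cons x xs => simpa using hcc)]
    rw [List.reverse_append, dropWhile_append_all _ _ (by simpa using hpend)]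
    rw [dropWhile_head_neg _ (by intro c hcc; exact hlast c (by simpa using hcc))]
    simp

lemma strip_cons_ws (c : Char) (p : List Char) (hws : PySem.Chars.isspace c = true) :
    PySem.Chars.strip (c :: p) = PySem.Chars.strip p := by
  unfold PySem.Chars.strip PySem.Chars.lstrip
  simp [hws]

-- flushing a state satisfying scanInv is exactly A's strip-filter step on cur ++ pend
lemma flush_eq (tokens : List String) (cur pend : List Char) (h : scanInv cur pend) :
    pvFlush (tokens, cur, pend) = tokens ++ proc [cur ++ pend] := by
  by_cases hc : cur = []
  · rcases h with ⟨_, h2⟩ | ⟨h1, _⟩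
    · subst hc h2
      simp [pvFlush, proc, show PySem.Chars.strip ([] : List Char) = [] from rfl]
    · exact absurd hc h1
  · have hs := strip_inv cur pend h hc
    simp [pvFlush, proc, hs, hc]

-- main scanner lemma: scanning l from (tokens, cur, pend) and flushing yields
-- tokens ++ proc of the comma pieces of l, the first extended by cur ++ pend.
lemma scan_spec (l : List Char) : ∀ (tokens : List String) (cur pend : List Char),
    scanInv cur pend →
    pvFlush (l.foldl pvStep (tokens, cur, pend))
      = tokens ++ proc (attachPre (cur ++ pend) (spC l)) := by
  induction l with
  | nil =>
      intro tokens cur pend h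
      simpa [spC, attachPre] using flush_eq tokens cur pend h
  | cons c rest ih =>
      intro tokens cur pend h
      by_cases hc : c = ','
      · subst hc
        have hstep : pvStep (tokens, cur, pend) ','
            = ((if cur ≠ [] then tokens ++ [String.ofList cur] else tokens), [], []) := by
          simp [pvStep]
        have hflush : (if cur ≠ [] then tokens ++ [String.ofList cur] else tokens)
            = tokens ++ proc [cur ++ pend] := by
          simpa [pvFlush] using flush_eq tokens cur pend h
        rw [List.foldl_cons, hstep, ih _ [] [] (Or.inl ⟨rfl, rfl⟩), hflush]
        cases hs : spC rest with
        | nil => exact absurd hs (spC_ne_nil rest)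
        | cons p ps => simp [spC, hs, attachPre, ← proc_append]
      · by_cases hws : PySem.Chars.isspace c = true
        · have hcomma : PySem.Chars.isspace ',' = false := by decide
          by_cases hcur : cur = []
          · have hpend : pend = [] := by
              rcases h with ⟨_, h2⟩ | ⟨h1, _⟩
              · exact h2
              · exact absurd hcur h1
            subst hcur hpend
            have hstep : pvStep (tokens, ([] : List Char), ([] : List Char)) c
                = (tokens, [], []) := by
              simp [pvStep, hc, hws]
            rw [List.foldl_cons, hstep, ih _ [] [] (Or.inl ⟨rfl, rfl⟩)]
            cases hs : spC rest with
            | nil => exact absurd hs (spC_ne_nil rest)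
            | cons p ps =>
                simp only [spC, hs, hc]
                simp [attachPre, proc, strip_cons_ws c p hws]
          · have hstep : pvStep (tokens, cur, pend) c = (tokens, cur, pend ++ [c]) := by
              simp [pvStep, hc, hws, hcur]
            have hinv : scanInv cur (pend ++ [c]) := by
              rcases h with ⟨h1, _⟩ | ⟨h1, h2, h3, h4⟩
              · exact absurd h1 hcur
              · exact Or.inr ⟨h1, by
                  intro d hd
                  rcases List.mem_append.mp hd with hd | hd
                  · exact h2 d hd
                  · simpa [List.mem_singleton.mp hd] using hws, h3, h4⟩
            rw [List.foldl_cons, hstep, ih _ cur (pend ++ [c]) hinv]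
            cases hs : spC rest with
            | nil => exact absurd hs (spC_ne_nil rest)
            | cons p ps => simp [spC, hs, hc, attachPre]
        · have hstep : pvStep (tokens, cur, pend) c = (tokens, cur ++ pend ++ [c], []) := by
            simp [pvStep, hc, hws]
          have hinv : scanInv (cur ++ pend ++ [c]) [] := by
            refine Or.inr ⟨by simp, by simp, ?_, ?_⟩
            · intro d hd
              by_cases hcur : cur = []
              · have hpend : pend = [] := by
                  rcases h with ⟨_, h2⟩ | ⟨h1, _⟩
                  · exact h2
                  · exact absurd hcur h1
                subst hcur hpend
                simp only [List.nil_append, List.head?_cons, Option.some.injEq] at hd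
                subst hd
                simpa using hws
              · rcases h with ⟨h1, _⟩ | ⟨_, _, h3, _⟩
                · exact absurd h1 hcur
                · cases cur with
                  | nil => exact absurd rfl hcur
                  | cons x xs =>
                      simp only [List.cons_append, List.head?_cons, Option.some.injEq] at hd
                      subst hd
                      exact h3 x rfl
            · intro d hd
              have hlast : (cur ++ pend ++ [c]).getLast? = some c := by
                simp [List.getLast?_append]
              rw [hlast] at hd
              cases hd
              simpa using hws
          rw [List.foldl_cons, hstep, ih _ (cur ++ pend ++ [c]) [] hinv]
          cases hs : spC rest with
          | nil => exact absurd hs (spC_ne_nil rest)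
          | cons p ps => simp [spC, hs, hc, attachPre]

lemma B_eq_flatMap (raw_values : List String) : ∀ (tokens : List String),
    raw_values.foldl (fun tokens value =>
      pvFlush (value.toList.foldl pvStep (tokens, [], []))) tokens
    = tokens ++ proc (raw_values.flatMap (fun v => spC v.toList)) := by
  induction raw_values with
  | nil => intro tokens; simp [proc]
  | cons v vs ih =>
      intro tokens
      rw [List.foldl_cons, scan_spec v.toList tokens [] [] (Or.inl ⟨rfl, rfl⟩), ih,
        List.flatMap_cons, proc_append]
      cases hs : spC v.toList with
      | nil => exact absurd hs (spC_ne_nil v.toList)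
      | cons p ps => simp [attachPre]

-- ===== VERDICT (by name: the statement is the Claim_ definition above) =====
theorem parse_csv_tokens_spec : Claim_equal_parse_csv_tokens := by
  intro raw_values _
  unfold Spec_parse_csv_tokens parse_csv_tokens parse_csv_tokens_alt
  rw [A_eq_flatMap, B_eq_flatMap]
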